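-- pv_equiv track=rewrite | github.com/akgithub755/flask_app | verify.py | break_at_keywords
-- ===== SOURCE A (Python) =====
-- def break_at_keywords(text):
--     # Define the keywords to split at, case-insensitive
--     keywords = ['from', 'when', 'while', 'case', 'if']
--
--     # Find the first keyword's position (case-insensitive)
--     keyword_positions = [(keyword, text.lower().find(keyword)) for keyword in keywords]
--
--     # Find the first occurrence of any keyword
--     keyword_positions = [pos for pos in keyword_positions if pos[1] != -1]
--
--     if keyword_positions:
--         # Get the first keyword's position
--         keyword, pos = min(keyword_positions, key=lambda x: x[1])
--
--         # Split the text at that position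
--         parts = [text[:pos + len(keyword)], text[pos + len(keyword):]]
--
--         # Return the first part and the keyword, followed by the second part on a new line
--         return parts[0] + keyword + '\n' + parts[1]
--     else:
--         # If no keyword is found, return the text as is
--         return text
-- ===== SOURCE B (Python) =====
-- def break_at_keywords(text):
--     # Single left-to-right scan that stops at the first (case-insensitive)
--     # keyword occurrence instead of building all find() positions and taking min.
--     keywords = ['from', 'when', 'while', 'case', 'if']
--     low = text.lower()
--     for i in range(len(low)):
--         for keyword in keywords:
--             if low.startswith(keyword, i):
--                 cut = i + len(keyword)
--                 return text[:cut] + keyword + '\n' + text[cut:]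
--     return text
-- ===== Notes on version B (the rewrite author's own statement) =====
-- stated objective: alternative
-- what changed: Replaces building all find() positions and taking min-by-key with a single left-to-right index scan that short-circuits at the first index where any keyword matches.
import Mathlib
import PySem

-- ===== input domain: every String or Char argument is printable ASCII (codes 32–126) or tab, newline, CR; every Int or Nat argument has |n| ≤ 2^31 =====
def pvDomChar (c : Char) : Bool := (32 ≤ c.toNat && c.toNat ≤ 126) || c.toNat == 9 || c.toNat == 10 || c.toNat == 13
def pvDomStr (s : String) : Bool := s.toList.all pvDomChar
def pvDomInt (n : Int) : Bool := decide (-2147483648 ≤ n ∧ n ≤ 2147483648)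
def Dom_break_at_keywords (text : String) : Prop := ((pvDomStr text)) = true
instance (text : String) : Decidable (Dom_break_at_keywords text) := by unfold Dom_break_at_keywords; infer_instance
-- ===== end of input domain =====

-- B replaces A's build-all-find-positions-then-min-by-key table with a single
-- left-to-right scan that stops at the first index where any keyword matches
-- (alternative decomposition, same result).


-- ===== PORT A =====
-- keywords = ['from', 'when', 'while', 'case', 'if'] (as code-point lists)
def aKeywords : List (List Char) :=
  ["from", "when", "while", "case", "if"].map String.toList

def break_at_keywords (text : String) : String :=
  -- keyword_positions = [(keyword, text.lower().find(keyword)) for keyword in keywords]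
  let keyword_positions :=
    aKeywords.map (fun keyword =>
      (keyword, PySem.Chars.find (PySem.Chars.lower text.toList) keyword))
  -- keyword_positions = [pos for pos in keyword_positions if pos[1] != -1]
  let keyword_positions := keyword_positions.filter (fun pos => pos.2 != -1)
  if keyword_positions ≠ [] then
    -- keyword, pos = min(keyword_positions, key=lambda x: x[1])  (nonempty here)
    match PySem.List.min? keyword_positions (fun x => x.2) with
    | some (keyword, pos) =>
      let parts := (PySem.List.slice text.toList none (some (pos + keyword.length)),
                    PySem.List.slice text.toList (some (pos + keyword.length)) none)
      String.ofList (parts.1 ++ keyword ++ ['\n'] ++ parts.2)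
    | none => text  -- unreachable: the list is nonempty
  else
    text

-- ===== PORT B =====
-- the loop 'for i in range(len(low)): for keyword in keywords: if low.startswith(keyword, i): return …'
-- (low.startswith(keyword, i) with 0 ≤ i ≤ len(low) is exactly startswith on low.drop i)
def bGo (text : String) (rest : List Char) (i : Nat) : String :=
  match rest with
  | [] => text
  | _ :: r =>
    match (["from", "when", "while", "case", "if"].map String.toList).find?
        (fun keyword => PySem.Chars.startswith rest keyword) with
    | some keyword =>
      String.ofList (text.toList.take (i + keyword.length) ++ keyword ++
                     '\n' :: text.toList.drop (i + keyword.length))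
    | none => bGo text r (i + 1)

def break_at_keywords_alt (text : String) : String :=
  bGo text (PySem.Chars.lower text.toList) 0

-- ===== PRECONDITION & SPEC =====
def Spec_break_at_keywords (text : String) (out : String) : Prop := out = break_at_keywords_alt text
instance (text : String) (out : String) : Decidable (Spec_break_at_keywords text out) := by unfold Spec_break_at_keywords; infer_instance

-- ===== CLAIM (what is proved, stated in full; the proofs are below) =====
def Claim_equal_break_at_keywords : Prop := ∀ (text : String), Dom_break_at_keywords text → Spec_break_at_keywords text (break_at_keywords text)

-- ===== LEMMAS AND PROOFS =====

-- no keyword is a prefix of another (so at most one keyword matches at a given index)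
lemma kw_no_prefix : ∀ k1 ∈ aKeywords, ∀ k2 ∈ aKeywords, k1 <+: k2 → k1 = k2 := by
  decide

lemma kw_ne_nil : ∀ k ∈ aKeywords, k ≠ [] := by decide

lemma bKeywords_eq : ["from", "when", "while", "case", "if"].map String.toList = aKeywords := rfl

-- when no keyword occurs in the lowered text, A returns the text unchanged
lemma A_no_match (text : String)
    (h : ∀ k ∈ aKeywords, ¬ k <:+: PySem.Chars.lower text.toList) :
    break_at_keywords text = text := by
  have hfil : (aKeywords.map (fun keyword =>
      (keyword, PySem.Chars.find (PySem.Chars.lower text.toList) keyword))).filter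
      (fun pos => pos.2 != -1) = [] := by
    simp only [List.filter_eq_nil_iff]
    intro p hm
    simp only [List.mem_map] at hm
    obtain ⟨k', hk', rfl⟩ := hm
    simp [(PySem.Chars.find_eq_neg_one_iff _ _).mpr (h k' hk')]
  simp only [break_at_keywords, hfil]
  simp

-- if a keyword matches at index i and none matches earlier, A splits exactly there
lemma A_match (text : String) (i : Nat) (kw : List Char)
    (hkw : kw ∈ aKeywords)
    (hpr : kw <+: (PySem.Chars.lower text.toList).drop i)
    (hbefore : ∀ j, j < i → ∀ k ∈ aKeywords, ¬ k <+: (PySem.Chars.lower text.toList).drop j) :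
    break_at_keywords text =
      String.ofList (text.toList.take (i + kw.length) ++ kw ++
                     '\n' :: text.toList.drop (i + kw.length)) := by
  set low := PySem.Chars.lower text.toList with hlow
  -- every keyword still present is found at an index ≥ i
  have hge : ∀ k ∈ aKeywords, PySem.Chars.find low k ≠ -1 →
      i ≤ (PySem.Chars.find low k).toNat ∧
      PySem.Chars.find low k = ((PySem.Chars.find low k).toNat : Int) := by
    intro k hk hne
    have hb := PySem.Chars.neg_one_le_find low k
    have h0 : 0 ≤ PySem.Chars.find low k := by omega
    obtain ⟨hp, _⟩ := PySem.Chars.find_spec (s := low) (sub := k) h0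
    refine ⟨?_, by omega⟩
    by_contra hlt
    exact hbefore _ (by omega) k hk hp
  -- kw is found exactly at i
  have hfkw : PySem.Chars.find low kw = (i : Int) := by
    have hocc : kw <:+: low :=
      (PySem.Chars.isIn_iff_infix kw low).mp
        ((PySem.Chars.exists_prefix_drop_iff_isIn kw low).mp ⟨i, hpr⟩)
    have h0 : 0 ≤ PySem.Chars.find low kw := (PySem.Chars.find_nonneg_iff low kw).mpr hocc
    obtain ⟨hp, hmin⟩ := PySem.Chars.find_spec (s := low) (sub := kw) h0
    have hle : (PySem.Chars.find low kw).toNat ≤ i := by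
      by_contra hgt
      exact hmin i (by omega) hpr
    have hgei := (hge kw hkw (by omega)).1
    omega
  -- the filtered position list and its membership facts
  set fil := (aKeywords.map (fun keyword =>
      (keyword, PySem.Chars.find low keyword))).filter (fun pos => pos.2 != -1) with hfild
  have hmemfil : (kw, (i : Int)) ∈ fil := by
    rw [hfild]
    simp only [List.mem_filter, List.mem_map]
    exact ⟨⟨kw, hkw, by rw [hfkw]⟩, by simp⟩
  have hne : fil ≠ [] := fun h => (List.not_mem_nil) (h ▸ hmemfil)
  -- the min-by-position entry is exactly (kw, i)
  have hminq : PySem.List.min? fil (fun x => x.2) = some (kw, (i : Int)) := by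
    obtain ⟨m, hm⟩ : ∃ m, PySem.List.min? fil (fun x => x.2) = some m := by
      cases hq : PySem.List.min? fil (fun x => x.2) with
      | none => exact absurd ((PySem.List.min?_eq_none_iff fil _).mp hq) hne
      | some m => exact ⟨m, rfl⟩
    have hmmin := PySem.List.min?_isMin hm _ hmemfil
    have hmmem := PySem.List.min?_mem hm
    rw [hfild] at hmmem
    simp only [List.mem_filter, List.mem_map] at hmmem
    obtain ⟨⟨k', hk', heq⟩, hne'⟩ := hmmem
    cases heq
    have hne'' : PySem.Chars.find low k' ≠ -1 := by simpa using hne'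
    obtain ⟨hige, hcast⟩ := hge k' hk' hne''
    have hmmin' : PySem.Chars.find low k' ≤ (i : Int) := by simpa using hmmin
    have hieq : (PySem.Chars.find low k').toNat = i := by omega
    -- so k' also matches at i, hence k' = kw
    have h0 : 0 ≤ PySem.Chars.find low k' := by omega
    have hp' : k' <+: low.drop i :=
      hieq ▸ (PySem.Chars.find_spec (s := low) (sub := k') h0).1
    have hkk : k' = kw := by
      rcases List.prefix_or_prefix_of_prefix hp' hpr with h | h
      · exact kw_no_prefix _ hk' _ hkw h
      · exact (kw_no_prefix _ hkw _ hk' h).symm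
    rw [hm, hkk, hfkw]
  -- evaluate A
  simp only [break_at_keywords, ← hlow, ← hfild]
  rw [if_pos hne, hminq]
  have hc : (i : Int) + (kw.length : Int) = ((i + kw.length : Nat) : Int) := by push_cast; ring
  simp only [hc, PySem.List.slice_to_natCast, PySem.List.slice_from_natCast]
  simp

-- the main loop invariant: if no keyword matches strictly before i, the scan from i
-- computes A's result
lemma bGo_eq (text : String) (low : List Char)
    (hlow : low = PySem.Chars.lower text.toList) :
    ∀ i, (∀ j, j < i → ∀ k ∈ aKeywords, ¬ k <+: low.drop j) →
      bGo text (low.drop i) i = break_at_keywords text := by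
  suffices H : ∀ rest i, low.drop i = rest →
      (∀ j, j < i → ∀ k ∈ aKeywords, ¬ k <+: low.drop j) →
      bGo text rest i = break_at_keywords text by
    intro i hinv; exact H _ i rfl hinv
  intro rest
  induction rest with
  | nil =>
    intro i hdrop hinv
    have hlen : low.length ≤ i := List.drop_eq_nil_iff.mp hdrop
    have hno : ∀ k ∈ aKeywords, ¬ k <:+: PySem.Chars.lower text.toList := by
      intro k hk hinf
      obtain ⟨j, hj⟩ := (PySem.Chars.exists_prefix_drop_iff_isIn k low).mpr
        ((PySem.Chars.isIn_iff_infix k low).mpr (hlow ▸ hinf))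
      rcases lt_or_ge j i with hji | hji
      · exact hinv j hji k hk hj
      · have hjnil : low.drop j = [] := List.drop_eq_nil_iff.mpr (by omega)
        rw [hjnil] at hj
        exact kw_ne_nil k hk (List.prefix_nil.mp hj)
    rw [A_no_match text hno]
    rfl
  | cons c r ih =>
    intro i hdrop hinv
    cases hfind : (["from", "when", "while", "case", "if"].map String.toList).find?
        (fun keyword => PySem.Chars.startswith (c :: r) keyword) with
    | some keyword =>
      have hmem : keyword ∈ aKeywords := bKeywords_eq ▸ List.mem_of_find?_eq_some hfind
      have hsw : PySem.Chars.startswith (c :: r) keyword = true := List.find?_some hfind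
      have hpr : keyword <+: (PySem.Chars.lower text.toList).drop i := by
        rw [← hlow, hdrop]; exact (PySem.Chars.startswith_iff _ _).mp hsw
      have hbef : ∀ j, j < i → ∀ k ∈ aKeywords,
          ¬ k <+: (PySem.Chars.lower text.toList).drop j := by
        rw [← hlow]; exact hinv
      rw [A_match text i keyword hmem hpr hbef]
      simp only [bGo, hfind]
    | none =>
      have hstep : bGo text (c :: r) i = bGo text r (i + 1) := by
        simp only [bGo, hfind]
      rw [hstep]
      have hdrop' : low.drop (i + 1) = r := by
        rw [List.drop_add_one_eq_tail_drop, hdrop]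
        rfl
      apply ih (i + 1) hdrop'
      intro j hj k hk
      rcases lt_or_ge j i with hji | hji
      · exact hinv j hji k hk
      · have hji' : j = i := by omega
        subst hji'
        rw [hdrop]
        intro hp
        have hnone := List.find?_eq_none.mp hfind k (bKeywords_eq ▸ hk)
        exact absurd ((PySem.Chars.startswith_iff _ _).mpr hp) (by simpa using hnone)

-- ===== VERDICT (by name: the statement is the Claim_ definition above) =====
theorem break_at_keywords_spec : Claim_equal_break_at_keywords := by
  intro text _
  show break_at_keywords text = break_at_keywords_alt text
  have h := bGo_eq text (PySem.Chars.lower text.toList) rfl 0 (by omega)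
  simpa [break_at_keywords_alt] using h.symm
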